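-- pv_equiv track=rewrite | github.com/pinreddysu/Cellular-Life-Simulator | Suchith_Pinreddy_R11704958_final_project[1].py | collectingNeighborInfo
-- ===== SOURCE A (Python) =====
-- def collectingNeighborInfo(r,matrix):
--   matrixCopy = matrix
--   lenth = len(matrix[0]) #access the length of the columns in matrix
--   lenth1 = len(matrix) #access the length of the rows in matrix
--   x = r+1 #access the row below
--   y = r-1 #access the row above
--   colMatrix = ['']*len(matrixCopy[0]) #creation empty list of characters to the length of the columns in the matrix
--   for col in range(lenth):
--     z = col - 1 #access the left side of the column
--     w = col +1  #access the right side of the column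
--     counter = 0 #counter
--     if(matrixCopy[r][w%lenth]=='+'):
--       counter+=1
--     if(matrixCopy[r][z%lenth]=='+'):
--       counter+=1
--     if(matrixCopy[x % lenth1][col]=='+'):
--       counter+=1
--     if(matrixCopy[x % lenth1][w % lenth]=='+'):
--       counter+=1
--     if(matrixCopy[x % lenth1][(z % lenth)]=='+'):
--       counter+=1
--     if(matrixCopy[y%lenth1][col] =='+'):
--       counter+=1
--     if(matrixCopy[y % lenth1][w % lenth] =='+'):
--       counter+=1
--     if(matrixCopy[y % lenth1][z % lenth] =='+'):
--       counter+=1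
--     if(matrixCopy[r][col] == '-'):
--       if(counter ==2 or counter ==3 or counter ==5 or counter ==7 or counter ==11): #checks if the total cells that are + in neighbors are prime or not when the cell that is -
--         colMatrix[col] = '+'
--       else:
--         colMatrix[col] = '-'
--     elif (matrix[r][col] == '+'):
--       if(counter ==2 or counter ==4 or counter ==6): #checks if the total cells that are + in neighbors either two or four or six when the cell that is +
--         colMatrix[col] = '+'
--       else:
--         colMatrix[col] = '-'
--
--   return colMatrix
-- ===== SOURCE B (Python) =====
-- def collectingNeighborInfo(r, matrix):
--     rows = len(matrix)
--     cols = len(matrix[0])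
--     up = matrix[(r - 1) % rows]
--     mid = matrix[r]
--     down = matrix[(r + 1) % rows]
--     tot = [(up[c] == '+') + (mid[c] == '+') + (down[c] == '+') for c in range(cols)]
--     out = []
--     for c in range(cols):
--         center = mid[c]
--         k = tot[(c - 1) % cols] + tot[c] + tot[(c + 1) % cols] - (center == '+')
--         if center == '-':
--             out.append('+' if k in (2, 3, 5, 7, 11) else '-')
--         elif center == '+':
--             out.append('+' if k in (2, 4, 6) else '-')
--         else:
--             out.append('')
--     return out
-- ===== Notes on version B (the rewrite author's own statement) =====
-- stated objective: alternative
-- what changed: replaces the per-cell 8-way neighbor scan with a precomputed per-column vertical '+'-count table, combining three adjacent column totals minus the center cell, and builds the output by append instead of in-place assignment into a preallocated list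
-- outside the precondition, e.g. on collectingNeighborInfo(1, [[]]): A returns [], B raises IndexError
import Mathlib
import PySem

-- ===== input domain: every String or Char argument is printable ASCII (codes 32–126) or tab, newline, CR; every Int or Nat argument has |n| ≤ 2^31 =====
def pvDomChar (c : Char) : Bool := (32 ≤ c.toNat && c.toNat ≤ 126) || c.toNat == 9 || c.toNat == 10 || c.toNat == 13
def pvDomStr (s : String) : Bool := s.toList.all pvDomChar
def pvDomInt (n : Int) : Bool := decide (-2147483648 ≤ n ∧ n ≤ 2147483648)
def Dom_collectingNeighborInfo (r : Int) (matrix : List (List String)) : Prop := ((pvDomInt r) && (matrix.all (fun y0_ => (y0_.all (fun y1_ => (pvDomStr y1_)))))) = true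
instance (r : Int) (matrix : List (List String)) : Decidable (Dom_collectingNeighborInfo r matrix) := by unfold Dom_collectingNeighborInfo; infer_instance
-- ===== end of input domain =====

-- B replaces A's per-cell 8-way neighbor scan by a per-column vertical '+'-count table combined
-- across three adjacent columns (minus the center cell), building the output by append; same results.


-- ===== PORT A =====
-- matrixCopy[i][j] (Python raises out of range; Pre_ keeps every access in range, the default is never read)
def pvA_get (matrix : List (List String)) (i j : Int) : String :=
  PySem.List.pyGetD (PySem.List.pyGetD matrix i []) j ""

def collectingNeighborInfo (r : Int) (matrix : List (List String)) : List String :=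
  let matrixCopy := matrix
  let lenth : Int := PySem.List.len (PySem.List.pyGetD matrixCopy 0 [])
  let lenth1 : Int := PySem.List.len matrixCopy
  let x := r + 1
  let y := r - 1
  let colMatrix := PySem.List.pyRepeat [""] lenth
  (PySem.List.pyRange 0 lenth 1).foldl (fun colMatrix col =>
    let z := col - 1
    let w := col + 1
    let counter : Int := 0
    let counter := if pvA_get matrixCopy r (PySem.Int.mod w lenth) = "+" then counter + 1 else counter
    let counter := if pvA_get matrixCopy r (PySem.Int.mod z lenth) = "+" then counter + 1 else counter
    let counter := if pvA_get matrixCopy (PySem.Int.mod x lenth1) col = "+" then counter + 1 else counter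
    let counter := if pvA_get matrixCopy (PySem.Int.mod x lenth1) (PySem.Int.mod w lenth) = "+" then counter + 1 else counter
    let counter := if pvA_get matrixCopy (PySem.Int.mod x lenth1) (PySem.Int.mod z lenth) = "+" then counter + 1 else counter
    let counter := if pvA_get matrixCopy (PySem.Int.mod y lenth1) col = "+" then counter + 1 else counter
    let counter := if pvA_get matrixCopy (PySem.Int.mod y lenth1) (PySem.Int.mod w lenth) = "+" then counter + 1 else counter
    let counter := if pvA_get matrixCopy (PySem.Int.mod y lenth1) (PySem.Int.mod z lenth) = "+" then counter + 1 else counter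
    if pvA_get matrixCopy r col = "-" then
      PySem.List.pySetD colMatrix col
        (if counter = 2 ∨ counter = 3 ∨ counter = 5 ∨ counter = 7 ∨ counter = 11 then "+" else "-")
    else if pvA_get matrix r col = "+" then
      PySem.List.pySetD colMatrix col
        (if counter = 2 ∨ counter = 4 ∨ counter = 6 then "+" else "-")
    else colMatrix) colMatrix

-- ===== PORT B =====
-- row[c] with default, as Source B reads cells (Pre_ keeps every access in range)
def pvB_cell (row : List String) (j : Int) : String := PySem.List.pyGetD row j ""

def collectingNeighborInfo_alt (r : Int) (matrix : List (List String)) : List String :=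
  let rows : Int := PySem.List.len matrix
  let cols : Int := PySem.List.len (PySem.List.pyGetD matrix 0 [])
  let up := PySem.List.pyGetD matrix (PySem.Int.mod (r - 1) rows) []
  let mid := PySem.List.pyGetD matrix r []
  let down := PySem.List.pyGetD matrix (PySem.Int.mod (r + 1) rows) []
  let tot : List Int := (PySem.List.pyRange 0 cols 1).map (fun c =>
    (if pvB_cell up c = "+" then 1 else 0) + (if pvB_cell mid c = "+" then 1 else 0)
      + (if pvB_cell down c = "+" then 1 else 0))
  (PySem.List.pyRange 0 cols 1).map (fun c =>
    let center := pvB_cell mid c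
    let k := PySem.List.pyGetD tot (PySem.Int.mod (c - 1) cols) 0
              + PySem.List.pyGetD tot c 0
              + PySem.List.pyGetD tot (PySem.Int.mod (c + 1) cols) 0
              - (if center = "+" then 1 else 0)
    if center = "-" then (if k = 2 ∨ k = 3 ∨ k = 5 ∨ k = 7 ∨ k = 11 then "+" else "-")
    else if center = "+" then (if k = 2 ∨ k = 4 ∨ k = 6 then "+" else "-")
    else "")

-- ===== PRECONDITION & SPEC =====
-- Pre_ excludes the inputs on which Python A raises an IndexError (an empty matrix, a row index r
-- outside [-len(matrix), len(matrix)) with a nonempty row 0, or one of the three accessed rows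
-- shorter than row 0), and with them the zero-column matrices with r out of range, where A returns
-- [] before ever indexing row r while B's natural matrix[r] lookup raises IndexError.
def Pre_collectingNeighborInfo (r : Int) (matrix : List (List String)) : Prop :=
  matrix ≠ [] ∧ -(matrix.length : Int) ≤ r ∧ r < (matrix.length : Int) ∧
  (matrix.headD []).length ≤ (PySem.List.pyGetD matrix r []).length ∧
  (matrix.headD []).length ≤ (PySem.List.pyGetD matrix (PySem.Int.mod (r + 1) (matrix.length : Int)) []).length ∧
  (matrix.headD []).length ≤ (PySem.List.pyGetD matrix (PySem.Int.mod (r - 1) (matrix.length : Int)) []).length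
instance (r : Int) (matrix : List (List String)) : Decidable (Pre_collectingNeighborInfo r matrix) := by
  unfold Pre_collectingNeighborInfo; infer_instance

def pvWitness_collectingNeighborInfo : Int × List (List String) :=
  (0, [["+", "-", "+"], ["-", "-", "+"], ["+", "+", "-"]])

def Spec_collectingNeighborInfo (r : Int) (matrix : List (List String)) (out : List String) : Prop := out = collectingNeighborInfo_alt r matrix
instance (r : Int) (matrix : List (List String)) (out : List String) : Decidable (Spec_collectingNeighborInfo r matrix out) := by unfold Spec_collectingNeighborInfo; infer_instance

-- ===== CLAIM (what is proved, stated in full; the proofs are below) =====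
def Claim_equal_collectingNeighborInfo : Prop := ∀ (r : Int) (matrix : List (List String)), Dom_collectingNeighborInfo r matrix → Pre_collectingNeighborInfo r matrix → Spec_collectingNeighborInfo r matrix (collectingNeighborInfo r matrix)

-- ===== LEMMAS AND PROOFS =====

-- the number of columns, len(matrix[0])
def pvN (matrix : List (List String)) : Int := PySem.List.len (PySem.List.pyGetD matrix 0 [])

-- A's loop body, as a named function (definitionally the lambda inside the port of A)
def pvStepA (r : Int) (matrix : List (List String)) (colMatrix : List String) (col : Int) : List String :=
  let lenth : Int := pvN matrix
  let lenth1 : Int := PySem.List.len matrix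
  let x := r + 1
  let y := r - 1
  let z := col - 1
  let w := col + 1
  let counter : Int := 0
  let counter := if pvA_get matrix r (PySem.Int.mod w lenth) = "+" then counter + 1 else counter
  let counter := if pvA_get matrix r (PySem.Int.mod z lenth) = "+" then counter + 1 else counter
  let counter := if pvA_get matrix (PySem.Int.mod x lenth1) col = "+" then counter + 1 else counter
  let counter := if pvA_get matrix (PySem.Int.mod x lenth1) (PySem.Int.mod w lenth) = "+" then counter + 1 else counter
  let counter := if pvA_get matrix (PySem.Int.mod x lenth1) (PySem.Int.mod z lenth) = "+" then counter + 1 else counter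
  let counter := if pvA_get matrix (PySem.Int.mod y lenth1) col = "+" then counter + 1 else counter
  let counter := if pvA_get matrix (PySem.Int.mod y lenth1) (PySem.Int.mod w lenth) = "+" then counter + 1 else counter
  let counter := if pvA_get matrix (PySem.Int.mod y lenth1) (PySem.Int.mod z lenth) = "+" then counter + 1 else counter
  if pvA_get matrix r col = "-" then
    PySem.List.pySetD colMatrix col
      (if counter = 2 ∨ counter = 3 ∨ counter = 5 ∨ counter = 7 ∨ counter = 11 then "+" else "-")
  else if pvA_get matrix r col = "+" then
    PySem.List.pySetD colMatrix col
      (if counter = 2 ∨ counter = 4 ∨ counter = 6 then "+" else "-")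
  else colMatrix

-- the value A's loop body stores at column col ("" when the center cell is neither '+' nor '-')
def pvValA (r : Int) (matrix : List (List String)) (col : Int) : String :=
  let lenth : Int := pvN matrix
  let lenth1 : Int := PySem.List.len matrix
  let x := r + 1
  let y := r - 1
  let z := col - 1
  let w := col + 1
  let counter : Int := 0
  let counter := if pvA_get matrix r (PySem.Int.mod w lenth) = "+" then counter + 1 else counter
  let counter := if pvA_get matrix r (PySem.Int.mod z lenth) = "+" then counter + 1 else counter
  let counter := if pvA_get matrix (PySem.Int.mod x lenth1) col = "+" then counter + 1 else counter
  let counter := if pvA_get matrix (PySem.Int.mod x lenth1) (PySem.Int.mod w lenth) = "+" then counter + 1 else counter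
  let counter := if pvA_get matrix (PySem.Int.mod x lenth1) (PySem.Int.mod z lenth) = "+" then counter + 1 else counter
  let counter := if pvA_get matrix (PySem.Int.mod y lenth1) col = "+" then counter + 1 else counter
  let counter := if pvA_get matrix (PySem.Int.mod y lenth1) (PySem.Int.mod w lenth) = "+" then counter + 1 else counter
  let counter := if pvA_get matrix (PySem.Int.mod y lenth1) (PySem.Int.mod z lenth) = "+" then counter + 1 else counter
  if pvA_get matrix r col = "-" then
    (if counter = 2 ∨ counter = 3 ∨ counter = 5 ∨ counter = 7 ∨ counter = 11 then "+" else "-")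
  else if pvA_get matrix r col = "+" then
    (if counter = 2 ∨ counter = 4 ∨ counter = 6 then "+" else "-")
  else ""

-- B's per-column function (definitionally the lambda inside the port of B, after inlining the lets)
def pvValB (r : Int) (matrix : List (List String)) (c : Int) : String :=
  let rows : Int := PySem.List.len matrix
  let cols : Int := pvN matrix
  let up := PySem.List.pyGetD matrix (PySem.Int.mod (r - 1) rows) []
  let mid := PySem.List.pyGetD matrix r []
  let down := PySem.List.pyGetD matrix (PySem.Int.mod (r + 1) rows) []
  let tot : List Int := (PySem.List.pyRange 0 cols 1).map (fun c =>
    (if pvB_cell up c = "+" then 1 else 0) + (if pvB_cell mid c = "+" then 1 else 0)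
      + (if pvB_cell down c = "+" then 1 else 0))
  let center := pvB_cell mid c
  let k := PySem.List.pyGetD tot (PySem.Int.mod (c - 1) cols) 0
            + PySem.List.pyGetD tot c 0
            + PySem.List.pyGetD tot (PySem.Int.mod (c + 1) cols) 0
            - (if center = "+" then 1 else 0)
  if center = "-" then (if k = 2 ∨ k = 3 ∨ k = 5 ∨ k = 7 ∨ k = 11 then "+" else "-")
  else if center = "+" then (if k = 2 ∨ k = 4 ∨ k = 6 then "+" else "-")
  else ""

lemma pv_getD_set (l : List String) (n : ℕ) (v : String) (j : ℕ) (hn : n < l.length) :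
    (l.set n v).getD j "" = if j = n then v else l.getD j "" := by
  by_cases hj : j < l.length
  · rw [List.getD_eq_getElem _ "" (by simpa using hj), List.getElem_set,
      List.getD_eq_getElem _ "" hj]
    by_cases h : j = n
    · rw [if_pos (by omega), if_pos h]
    · rw [if_neg (by omega), if_neg h]
  · have hj' : l.length ≤ j := not_lt.mp hj
    rw [List.getD_eq_default _ _ (by simpa using hj'), List.getD_eq_default _ _ hj',
      if_neg (by omega)]

lemma pv_ite_add (p : Prop) [Decidable p] (c : Int) :
    (if p then c + 1 else c) = c + (if p then (1 : Int) else 0) := by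
  split <;> ring

-- a loop body of the shape "write v1 / write v2 / leave alone" updates exactly column c
lemma pv_step_abstract (center v1 v2 : String) (acc : List String) (c : Int)
    (h0 : 0 ≤ c) (hlt : c < (acc.length : Int)) (hz : acc.getD c.toNat "" = "") :
    (if center = "-" then PySem.List.pySetD acc c v1
     else if center = "+" then PySem.List.pySetD acc c v2 else acc).length = acc.length ∧
      ∀ j : ℕ, j < acc.length →
        (if center = "-" then PySem.List.pySetD acc c v1
         else if center = "+" then PySem.List.pySetD acc c v2 else acc).getD j "" =
          if (j : Int) = c then
            (if center = "-" then v1 else if center = "+" then v2 else "")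
          else acc.getD j "" := by
  have hcn : c.toNat < acc.length := by omega
  split_ifs with h1 h2
  · rw [PySem.List.pySetD_of_nonneg _ _ h0]
    refine ⟨List.length_set .., ?_⟩
    intro j hj
    rw [pv_getD_set _ _ _ _ hcn]
    by_cases h : j = c.toNat
    · rw [if_pos h, if_pos (by omega)]
    · rw [if_neg h, if_neg (by omega)]
  · rw [PySem.List.pySetD_of_nonneg _ _ h0]
    refine ⟨List.length_set .., ?_⟩
    intro j hj
    rw [pv_getD_set _ _ _ _ hcn]
    by_cases h : j = c.toNat
    · rw [if_pos h, if_pos (by omega)]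
    · rw [if_neg h, if_neg (by omega)]
  · refine ⟨rfl, ?_⟩
    intro j hj
    by_cases h : j = c.toNat
    · rw [if_pos (by omega)]
      rw [h]
      exact hz
    · rw [if_neg (by omega)]

set_option maxHeartbeats 1000000 in
-- A's loop body writes pvValA at column c and touches nothing else
lemma pvStepA_spec (r : Int) (matrix : List (List String)) (acc : List String) (c : Int)
    (h0 : 0 ≤ c) (hlt : c < (acc.length : Int)) (hz : acc.getD c.toNat "" = "") :
    (pvStepA r matrix acc c).length = acc.length ∧
      ∀ j : ℕ, j < acc.length →
        (pvStepA r matrix acc c).getD j "" =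
          if (j : Int) = c then pvValA r matrix c else acc.getD j "" :=
  pv_step_abstract (pvA_get matrix r c) _ _ acc c h0 hlt hz

-- folding a write-once-per-index loop body over a list of distinct in-range indices
lemma pv_foldl_set (step : List String → Int → List String) (out : Int → String)
    (hstep : ∀ (acc : List String) (c : Int), 0 ≤ c → c < (acc.length : Int) →
      acc.getD c.toNat "" = "" →
      (step acc c).length = acc.length ∧
        ∀ j : ℕ, j < acc.length →
          (step acc c).getD j "" = if (j : Int) = c then out c else acc.getD j "") :
    ∀ (l : List Int) (acc : List String),
      (∀ i ∈ l, 0 ≤ i ∧ i < (acc.length : Int)) → l.Nodup →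
      (∀ i ∈ l, acc.getD i.toNat "" = "") →
      (l.foldl step acc).length = acc.length ∧
        ∀ j : ℕ, j < acc.length →
          (l.foldl step acc).getD j "" =
            if (j : Int) ∈ l then out j else acc.getD j "" := by
  intro l
  induction l with
  | nil => intro acc _ _ _; simp
  | cons c l ih =>
    intro acc hb hnd hz
    have hc0 : 0 ≤ c := (hb c (by simp)).1
    have hclt : c < (acc.length : Int) := (hb c (by simp)).2
    have hcz : acc.getD c.toNat "" = "" := hz c (by simp)
    obtain ⟨hlen, hget⟩ := hstep acc c hc0 hclt hcz
    have hcnotin : c ∉ l := (List.nodup_cons.mp hnd).1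
    have ih' := ih (step acc c)
      (by intro i hi; rw [hlen]; exact hb i (by simp [hi]))
      (List.nodup_cons.mp hnd).2
      (by
        intro i hi
        have h0 : 0 ≤ i := (hb i (by simp [hi])).1
        have hlt : i < (acc.length : Int) := (hb i (by simp [hi])).2
        have hj : i.toNat < acc.length := by omega
        rw [hget i.toNat hj]
        have hne : ¬ ((i.toNat : Int) = c) := by
          intro h
          apply hcnotin
          have : i = c := by omega
          rwa [← this]
        rw [if_neg hne]
        exact hz i (by simp [hi]))
    refine ⟨by rw [List.foldl_cons, ih'.1, hlen], ?_⟩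
    intro j hj
    rw [List.foldl_cons, ih'.2 j (by rw [hlen]; exact hj)]
    by_cases hjl : (j : Int) ∈ l
    · simp [hjl]
    · rw [hget j hj]
      by_cases hjc : (j : Int) = c
      · simp [hjc]
      · simp [hjl, hjc]

-- the 3x3 column-total recombination cancels the center cell exactly
lemma pv_col_abstract (center : String)
    (mw mz dc dw dz uc uw uz mc : Int) :
    (if center = "-" then
      (if 0 + mw + mz + dc + dw + dz + uc + uw + uz = 2 ∨ 0 + mw + mz + dc + dw + dz + uc + uw + uz = 3 ∨
          0 + mw + mz + dc + dw + dz + uc + uw + uz = 5 ∨ 0 + mw + mz + dc + dw + dz + uc + uw + uz = 7 ∨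
          0 + mw + mz + dc + dw + dz + uc + uw + uz = 11 then "+" else "-")
    else if center = "+" then
      (if 0 + mw + mz + dc + dw + dz + uc + uw + uz = 2 ∨ 0 + mw + mz + dc + dw + dz + uc + uw + uz = 4 ∨
          0 + mw + mz + dc + dw + dz + uc + uw + uz = 6 then "+" else "-")
    else "")
    =
    (if center = "-" then
      (if uz + mz + dz + (uc + mc + dc) + (uw + mw + dw) - mc = 2 ∨ uz + mz + dz + (uc + mc + dc) + (uw + mw + dw) - mc = 3 ∨
          uz + mz + dz + (uc + mc + dc) + (uw + mw + dw) - mc = 5 ∨ uz + mz + dz + (uc + mc + dc) + (uw + mw + dw) - mc = 7 ∨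
          uz + mz + dz + (uc + mc + dc) + (uw + mw + dw) - mc = 11 then "+" else "-")
    else if center = "+" then
      (if uz + mz + dz + (uc + mc + dc) + (uw + mw + dw) - mc = 2 ∨ uz + mz + dz + (uc + mc + dc) + (uw + mw + dw) - mc = 4 ∨
          uz + mz + dz + (uc + mc + dc) + (uw + mw + dw) - mc = 6 then "+" else "-")
    else "") := by
  have h : uz + mz + dz + (uc + mc + dc) + (uw + mw + dw) - mc
      = 0 + mw + mz + dc + dw + dz + uc + uw + uz := by ring
  rw [h]

set_option maxRecDepth 8192 in
set_option maxHeartbeats 1600000 in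
-- per column, A's 8-cell count branch equals B's table recombination branch
lemma pv_col (r : Int) (matrix : List (List String)) (c : Int)
    (h0 : 0 ≤ c) (hlt : c < pvN matrix) :
    pvValA r matrix c = pvValB r matrix c := by
  have hn : (0 : Int) < pvN matrix := by omega
  simp only [pvValA, pvValB, pvB_cell, pvA_get, pv_ite_add,
    PySem.List.pyGetD_map_pyRange_of_nonneg, PySem.Int.mod_nonneg _ hn, PySem.Int.mod_lt _ hn,
    h0, hlt]
  exact pv_col_abstract _ _ _ _ _ _ _ _ _ _

-- ===== VERDICT (by name: the statement is the Claim_ definition above) =====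
theorem collectingNeighborInfo_spec : Claim_equal_collectingNeighborInfo := by
  intro r matrix _ _
  unfold Spec_collectingNeighborInfo
  have hn0 : 0 ≤ pvN matrix := by
    simp [pvN, PySem.List.len_eq]
  have hA : collectingNeighborInfo r matrix
      = (PySem.List.pyRange 0 (pvN matrix) 1).foldl (pvStepA r matrix)
          (PySem.List.pyRepeat [""] (pvN matrix)) := rfl
  rw [PySem.List.pyRepeat_singleton] at hA
  have hB : collectingNeighborInfo_alt r matrix
      = (PySem.List.pyRange 0 (pvN matrix) 1).map (pvValB r matrix) := rfl
  obtain ⟨hlen, hget⟩ := pv_foldl_set (pvStepA r matrix) (pvValA r matrix)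
    (pvStepA_spec r matrix)
    (PySem.List.pyRange 0 (pvN matrix) 1) (List.replicate (pvN matrix).toNat "")
    (by
      intro i hi
      rw [PySem.List.mem_pyRange_one] at hi
      simp only [List.length_replicate]
      omega)
    (PySem.List.nodup_pyRange_one _ _)
    (by intro i _; simp)
  rw [hA, hB]
  apply List.ext_getElem
  · rw [hlen]
    simp [PySem.List.length_pyRange_one]
  · intro j hj1 hj2
    have hjn : j < (pvN matrix).toNat := by
      rwa [hlen, List.length_replicate] at hj1
    rw [List.getElem_map, PySem.List.getElem_pyRange_one,
        ← List.getD_eq_getElem _ "" hj1,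
        hget j (by rwa [List.length_replicate])]
    have hmem : ((j : Int)) ∈ PySem.List.pyRange 0 (pvN matrix) 1 := by
      rw [PySem.List.mem_pyRange_one]
      omega
    rw [if_pos hmem, zero_add]
    exact pv_col r matrix j (by omega) (by omega)
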